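-- pv_equiv track=rewrite | github.com/justhumannn/jun_baekjoon | 백준/Gold/2447. 별 찍기 － 10/별 찍기 － 10.py | f
-- ===== SOURCE A (Python) =====
-- def f(n):
--     if n==1:
--         return ["*"]
--     t=f(n//3)
--     r=[]
--     for s in t:
--         r.append(s*3)
--     for s in t:
--         r.append(s+" "*(n//3)+s)
--     for s in t:
--         r.append(s*3)
--     return r
-- ===== SOURCE B (Python) =====
-- def f(n):
--     chain = []
--     m = n
--     while m > 1:
--         chain.append(m)
--         m //= 3
--
--     def row(i):
--         s = "*"
--         u = 0
--         for m in reversed(chain):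
--             if (i // 3 ** u) % 3 == 1:
--                 s = s + " " * (m // 3) + s
--             else:
--                 s = s * 3
--             u += 1
--         return s
--
--     return [row(i) for i in range(3 ** len(chain))]
-- ===== Notes on version B (the rewrite author's own statement) =====
-- stated objective: alternative
-- what changed: Replaces the structural recursion (build the pattern for n//3, then assemble three triple-row passes) by a non-recursive per-row construction: compute the chain n, n//3, ... down to 1 once, then build each row independently from the base-3 digits of its index.
import Mathlib
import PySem

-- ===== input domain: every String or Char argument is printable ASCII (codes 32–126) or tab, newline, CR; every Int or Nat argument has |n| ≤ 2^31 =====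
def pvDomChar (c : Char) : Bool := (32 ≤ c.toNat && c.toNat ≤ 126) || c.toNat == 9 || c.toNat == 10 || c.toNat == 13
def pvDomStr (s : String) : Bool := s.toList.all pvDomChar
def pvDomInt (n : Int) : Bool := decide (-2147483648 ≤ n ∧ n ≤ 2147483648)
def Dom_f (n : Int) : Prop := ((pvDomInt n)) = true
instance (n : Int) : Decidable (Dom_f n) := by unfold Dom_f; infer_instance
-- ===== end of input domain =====

-- B builds each row independently from the base-3 digits of its index (after computing the chain
-- n, n//3, …, down to 1 once) instead of A's structural recursion over n//3; objective:
-- alternative decomposition, no speed claim. Rows are kept as List Char inside the ports (the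
-- String ↔ List Char bridge) and wrapped with String.ofList at the end.

-- ===== PORT A =====
-- A's recursion terminates only when iterating //3 from n reaches 1; the port is made total with
-- fuel (64 is never exhausted on Dom ∩ Pre_, where the recursion depth is at most 20).
def fAuxA : Nat → Int → List (List Char)
  | 0, _ => []
  | fuel+1, n =>
    if n = 1 then [['*']]
    else
      let t := fAuxA fuel (PySem.Int.floordiv n 3)
      let r := t.foldl (fun r s => r ++ [PySem.List.pyRepeat s 3]) ([] : List (List Char))
      let r := t.foldl
        (fun r s => r ++ [s ++ PySem.List.pyRepeat [' '] (PySem.Int.floordiv n 3) ++ s]) r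
      let r := t.foldl (fun r s => r ++ [PySem.List.pyRepeat s 3]) r
      r

def f (n : Int) : List String := (fAuxA 64 n).map String.ofList

-- ===== PORT B =====
-- the while loop 'chain.append(m); m //= 3' of Source B, made total with fuel (never exhausted on Dom ∩ Pre_)
def chainAux : Nat → Int → List Int
  | 0, _ => []
  | fuel+1, m => if 1 < m then m :: chainAux fuel (PySem.Int.floordiv m 3) else []

-- one iteration of the loop body of Source B's helper 'row': state (s, u)
def rowStep (i : Int) (su : List Char × Nat) (m : Int) : List Char × Nat :=
  (if PySem.Int.mod (PySem.Int.floordiv i ((3:Int) ^ su.2)) 3 = 1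
   then su.1 ++ PySem.List.pyRepeat [' '] (PySem.Int.floordiv m 3) ++ su.1
   else PySem.List.pyRepeat su.1 3,
   su.2 + 1)

-- Source B's helper 'row(i)': fold the loop body over reversed(chain) starting from ("*", 0)
def rowB (i : Int) (chain : List Int) : List Char :=
  (chain.reverse.foldl (fun su m => rowStep i su m) (['*'], 0)).1

def f_alt (n : Int) : List String :=
  let chain := chainAux 64 n
  (PySem.List.pyRange 0 ((3:Int) ^ chain.length) 1).map (fun i => String.ofList (rowB i chain))

-- ===== PRECONDITION & SPEC =====
-- Pre_ is exactly the set where the Python A returns: A recurses on n//3 and only stops at 1, so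
-- it terminates iff the leading base-3 digit of n is 1, i.e. n < 2 * 3 ^ (log₃ n); everywhere
-- else (n ≤ 0, or leading digit 2) A raises RecursionError.
def Pre_f (n : Int) : Prop := 1 ≤ n ∧ n < 2 * 3 ^ (Nat.log 3 n.toNat)
instance (n : Int) : Decidable (Pre_f n) := by unfold Pre_f; infer_instance

def pvWitness_f : Int := (27)

def Spec_f (n : Int) (out : List String) : Prop := out = f_alt n
instance (n : Int) (out : List String) : Decidable (Spec_f n out) := by unfold Spec_f; infer_instance

-- ===== CLAIM (what is proved, stated in full; the proofs are below) =====
def Claim_equal_f : Prop := ∀ (n : Int), Dom_f n → Pre_f n → Spec_f n (f n)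

-- ===== LEMMAS AND PROOFS =====
-- digit below the split point: (b*3^k + i0) // 3^v agrees with i0 // 3^v  mod 3, for v < k
lemma digit_low (b i0 : Int) (v k : Nat) (hv : v < k) :
    PySem.Int.mod (PySem.Int.floordiv (b * 3 ^ k + i0) ((3:Int) ^ v)) 3
      = PySem.Int.mod (PySem.Int.floordiv i0 ((3:Int) ^ v)) 3 := by
  have h3v : (0:Int) < 3 ^ v := by positivity
  have hk : b * 3 ^ k + i0 = i0 + (b * 3 ^ (k - v)) * 3 ^ v := by
    have : (3:Int) ^ k = 3 ^ (k - v) * 3 ^ v := by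
      rw [← pow_add]; congr 1; omega
    rw [this]; ring
  rw [PySem.Int.floordiv_eq_ediv_of_pos h3v, PySem.Int.floordiv_eq_ediv_of_pos h3v, hk,
    Int.add_mul_ediv_right _ _ (by positivity : ((3:Int)^v) ≠ 0)]
  rw [PySem.Int.mod_eq_emod_of_pos (by norm_num), PySem.Int.mod_eq_emod_of_pos (by norm_num)]
  have h3 : b * 3 ^ (k - v) = (b * 3 ^ (k - v - 1)) * 3 := by
    rw [mul_assoc]; congr 1
    rw [← pow_succ]; congr 1; omega
  rw [h3, Int.add_mul_emod_self_right]

lemma snd_foldl (i : Int) (cs : List Int) (p : List Char × Nat) :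
    (cs.foldl (fun su m => rowStep i su m) p).2 = p.2 + cs.length := by
  induction cs generalizing p with
  | nil => simp
  | cons c cs ih =>
    simp only [List.foldl_cons]; rw [ih]
    simp only [rowStep, List.length_cons]; omega

lemma foldl_congr_digits (i i' : Int) (cs : List Int) (s : List Char) (u : Nat)
    (h : ∀ v, u ≤ v → v < u + cs.length →
      PySem.Int.mod (PySem.Int.floordiv i ((3:Int) ^ v)) 3
        = PySem.Int.mod (PySem.Int.floordiv i' ((3:Int) ^ v)) 3) :
    cs.foldl (fun su m => rowStep i su m) (s, u) = cs.foldl (fun su m => rowStep i' su m) (s, u) := by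
  induction cs generalizing s u with
  | nil => rfl
  | cons c cs ih =>
    simp only [List.foldl_cons]
    have h0 := h u le_rfl (by simp only [List.length_cons]; omega)
    have hstep : rowStep i (s, u) c = rowStep i' (s, u) c := by
      simp only [rowStep, h0]
    rw [hstep]
    rcases hr : rowStep i' (s, u) c with ⟨s', u'⟩
    have hu' : u' = u + 1 := by simp [rowStep] at hr; omega
    subst hu'
    exact ih s' (u+1) (fun v h1 h2 => h v (by omega) (by simp only [List.length_cons]; omega))

lemma chain_le_one (fuel : Nat) (m : Int) (h : m ≤ 1) : chainAux fuel m = [] := by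
  cases fuel with
  | zero => rfl
  | succ g => simp [chainAux]; omega

lemma chain_cons (fuel : Nat) (n : Int) (h : 1 < n) :
    chainAux (fuel+1) n = n :: chainAux fuel (PySem.Int.floordiv n 3) := by
  simp [chainAux, h]

lemma chain_len : ∀ (k fuel : Nat) (n : Int), k < fuel → (3:Int) ^ k ≤ n → n < 2 * 3 ^ k →
    (chainAux fuel n).length = k := by
  intro k
  induction k with
  | zero =>
    intro fuel n _ h1 h2
    have : n = 1 := by simp at h1 h2; omega
    rw [this, chain_le_one _ _ le_rfl]; rfl
  | succ k ih =>
    intro fuel n hf h1 h2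
    obtain ⟨g, rfl⟩ : ∃ g, fuel = g + 1 := ⟨fuel - 1, by omega⟩
    have h3k : (0:Int) < 3 ^ k := by positivity
    have hn : 1 < n := by
      have : (3:Int) ^ (k+1) ≥ 3 ^ 1 := by
        apply pow_le_pow_right₀ <;> omega
      simp at this; omega
    rw [chain_cons _ _ hn, List.length_cons]
    rw [ih g (PySem.Int.floordiv n 3) (by omega)
      ((PySem.Int.le_floordiv_iff_mul_le (by norm_num)).2 (by rw [← pow_succ]; exact h1))
      ((PySem.Int.floordiv_lt_iff_lt_mul (by norm_num)).2 (by rw [mul_assoc, ← pow_succ]; exact h2))]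

-- reindex a shifted range
lemma pyRange_shift (a m : Int) :
    PySem.List.pyRange a (a + m) 1 = (PySem.List.pyRange 0 m 1).map (fun i => a + i) := by
  rw [PySem.List.pyRange_one, PySem.List.pyRange_one]
  simp [List.map_map, Function.comp_def]

-- the row of a block index: peel the outermost level
lemma rowB_block (n : Int) (C : List Int) (k : Nat) (hC : C.length = k)
    (b i0 : Int) (hb : 0 ≤ b) (hb3 : b < 3) (h0 : 0 ≤ i0) (h1 : i0 < 3 ^ k) :
    rowB (b * 3 ^ k + i0) (n :: C)
      = if b = 1
        then rowB i0 C ++ PySem.List.pyRepeat [' '] (PySem.Int.floordiv n 3) ++ rowB i0 C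
        else PySem.List.pyRepeat (rowB i0 C) 3 := by
  have h3k : (0:Int) < 3 ^ k := by positivity
  unfold rowB
  rw [List.reverse_cons, List.foldl_append]
  have hcongr := foldl_congr_digits (b * 3 ^ k + i0) i0 C.reverse ['*'] 0
    (fun v _ h2 => by
      apply digit_low
      simp only [List.length_reverse, hC] at h2; omega)
  rw [hcongr]
  have hdiv : PySem.Int.floordiv (b * 3 ^ k + i0) ((3:Int) ^ k) = b :=
    (PySem.Int.floordiv_eq_iff_of_pos h3k).2 ⟨by omega, by nlinarith⟩
  have hmod : PySem.Int.mod b 3 = b := by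
    rw [PySem.Int.mod_eq_emod_of_pos (by norm_num)]
    omega
  have hsnd := snd_foldl i0 C.reverse (['*'], 0)
  simp only [List.length_reverse, hC] at hsnd
  rcases hfold : C.reverse.foldl (fun su m => rowStep i0 su m) (['*'], 0) with ⟨s1, u1⟩
  have hu1 : u1 = k := by rw [hfold] at hsnd; simpa using hsnd
  simp only [List.foldl_cons, List.foldl_nil]
  simp only [rowStep, hu1, hdiv, hmod]

lemma main_eq : ∀ (k f1 f2 : Nat) (n : Int), k < f1 → k < f2 →
    (3:Int) ^ k ≤ n → n < 2 * 3 ^ k →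
    fAuxA f1 n = (PySem.List.pyRange 0 ((3:Int) ^ (chainAux f2 n).length) 1).map
      (fun i => rowB i (chainAux f2 n)) := by
  intro k
  induction k with
  | zero =>
    intro f1 f2 n hf1 hf2 h1 h2
    have hn : n = 1 := by simp at h1 h2; omega
    subst hn
    obtain ⟨g1, rfl⟩ : ∃ g, f1 = g + 1 := ⟨f1 - 1, by omega⟩
    rw [chain_le_one _ _ le_rfl]
    show fAuxA (g1+1) 1 = _
    simp only [fAuxA]
    rw [show ((3:Int) ^ (List.length ([] : List Int)) = 1) from rfl,
      PySem.List.pyRange_one]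
    simp [rowB]
  | succ k ih =>
    intro f1 f2 n hf1 hf2 h1 h2
    obtain ⟨g1, rfl⟩ : ∃ g, f1 = g + 1 := ⟨f1 - 1, by omega⟩
    obtain ⟨g2, rfl⟩ : ∃ g, f2 = g + 1 := ⟨f2 - 1, by omega⟩
    have h3k : (0:Int) < 3 ^ k := by positivity
    have hn3 : 3 ≤ n := by
      have : (3:Int) ^ 1 ≤ 3 ^ (k+1) := by apply pow_le_pow_right₀ <;> omega
      simp at this; omega
    set q := PySem.Int.floordiv n 3 with hq
    have hq1 : (3:Int) ^ k ≤ q :=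
      (PySem.Int.le_floordiv_iff_mul_le (by norm_num)).2 (by rw [← pow_succ]; exact h1)
    have hq2 : q < 2 * 3 ^ k :=
      (PySem.Int.floordiv_lt_iff_lt_mul (by norm_num)).2 (by rw [mul_assoc, ← pow_succ]; exact h2)
    have hCq : (chainAux g2 q).length = k := chain_len k g2 q (by omega) hq1 hq2
    have hIH := ih g1 g2 q (by omega) (by omega) hq1 hq2
    -- unfold A one step
    have hA : fAuxA (g1+1) n
        = (fAuxA g1 q).map (fun s => PySem.List.pyRepeat s 3)
          ++ ((fAuxA g1 q).map (fun s => s ++ PySem.List.pyRepeat [' '] q ++ s)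
          ++ (fAuxA g1 q).map (fun s => PySem.List.pyRepeat s 3)) := by
      show (if n = 1 then _ else _) = _
      rw [if_neg (by omega)]
      simp only [PySem.List.foldl_append_singleton_eq_map, List.nil_append, List.append_assoc]
      rw [← hq]
    rw [hA]
    -- unfold B's chain one step
    rw [chain_cons _ _ (by omega), ← hq]
    set C := chainAux g2 q with hCdef
    rw [List.length_cons, hCq]
    -- split the range into three blocks
    have e1 : (3:Int) ^ (k+1) = 3 ^ k + (3 ^ k + 3 ^ k) := by ring
    rw [PySem.List.pyRange_one_append 0 (3 ^ k) (3 ^ (k+1)) (by positivity) (by rw [e1]; omega),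
      PySem.List.pyRange_one_append (3 ^ k) (2 * 3 ^ k) (3 ^ (k+1)) (by omega) (by rw [e1]; omega),
      List.map_append, List.map_append]
    congr 1
    · -- block b = 0
      rw [hIH, hCq, List.map_map]
      apply List.map_congr_left
      intro i0 hi0
      obtain ⟨hl, hr⟩ := PySem.List.mem_pyRange_one.1 hi0
      have hrb := rowB_block n C k hCq 0 i0 (by omega) (by omega) hl hr
      simp only [zero_mul, zero_add] at hrb
      rw [Function.comp_apply, hrb, if_neg (by omega)]
    congr 1
    · -- block b = 1
      rw [show (2 * (3:Int) ^ k) = 3 ^ k + 3 ^ k by ring, pyRange_shift,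
        List.map_map, hIH, hCq, List.map_map]
      apply List.map_congr_left
      intro i0 hi0
      obtain ⟨hl, hr⟩ := PySem.List.mem_pyRange_one.1 hi0
      have hrb := rowB_block n C k hCq 1 i0 (by omega) (by omega) hl hr
      rw [← hq] at hrb
      simp only [Function.comp_apply]
      rw [show (3:Int) ^ k + i0 = 1 * 3 ^ k + i0 by ring, hrb, if_pos rfl]
    · -- block b = 2
      rw [show (3:Int) ^ (k+1) = 2 * 3 ^ k + 3 ^ k by ring, pyRange_shift,
        List.map_map, hIH, hCq, List.map_map]
      apply List.map_congr_left
      intro i0 hi0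
      obtain ⟨hl, hr⟩ := PySem.List.mem_pyRange_one.1 hi0
      have hrb := rowB_block n C k hCq 2 i0 (by omega) (by omega) hl hr
      simp only [Function.comp_apply]
      rw [hrb, if_neg (by omega)]

-- ===== VERDICT (by name: the statement is the Claim_ definition above) =====
theorem f_spec : Claim_equal_f := by
  intro n hdom hpre
  unfold Spec_f
  obtain ⟨h1, h2⟩ := hpre
  set k := Nat.log 3 n.toNat with hkdef
  have hnn : (n.toNat : Int) = n := Int.toNat_of_nonneg (by omega)
  have hlow : (3:Int) ^ k ≤ n := by
    have hx0 : n.toNat ≠ 0 := by omega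
    have := Nat.pow_log_le_self 3 hx0
    rw [← hkdef] at this
    calc ((3:Int) ^ k) = ((3 ^ k : Nat) : Int) := by push_cast; ring
    _ ≤ (n.toNat : Int) := by exact_mod_cast this
    _ = n := hnn
  have hk20 : k ≤ 20 := by
    by_contra hc
    have h21 : (3:Int) ^ 21 ≤ 3 ^ k := by
      apply pow_le_pow_right₀ <;> omega
    have hdn : n ≤ 2147483648 := by
      simp [Dom_f, pvDomInt] at hdom; omega
    have : (3:Int) ^ 21 = 10460353203 := by norm_num
    omega
  unfold f f_alt
  rw [main_eq k 64 64 n (by omega) (by omega) hlow h2]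
  simp [List.map_map, Function.comp_def]
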